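-- pv_equiv track=rewrite | github.com/RCanDo/Python | Codility/task.py | solution
-- ===== SOURCE A (Python) =====
-- def solution(S):
--     """
--     Call the string 'balanced' when each letter appears in it in lower- and upper-case.
--     Eg. "Aa", "Aaa", "AaBb", "bABaa" are all balanced while
--     "A", "aa", "aAb", "aAbb", "bABaC" are not balanced.
--     For any string find there the length of a _minimal_ balanced substring (continuous).
--     Return -1 if there is no balanced substring.
--     We assume string is non-empty.
--     E.g.
--     solution('a')    #-> -1
--     solution('aA')   #-> 2
--     solution('aAa')  #-> 2
--     solution('azABaabza')  #-> 5  'ABaab'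
--     solution('TacoCat')    #-> -1
--     solution('AcZCbaBz')   #-> 8   whole string only
--     solution('akjbdgiubweirjnvpiqyebr')  #-> -1
--     """
--     if len(S) == 1:
--         balanced = -1
--
--     else:
--         def is_balanced(S):
--
--             dset = {ord(s) for s in set(S)}   # only unique letters !
--             upper = [d for d in dset if d in range(65, 91)]
--             lower = [d for d in dset if d in range(97, 123)]
--
--             if len(upper) != len(lower):
--                 return False
--
--             else:
--                 return all( (d + 32 in lower) for d in upper )
--
--         balanced = len(S) + 1
--         for start in range(len(S)-1):
--             for end in range(start+1, len(S)+1):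
--                 substring = S[start:end]
--                 if is_balanced(substring):
--                     balanced = min(balanced, len(substring))
--                     if balanced == 2:   # the shortest possible balanced string
--                         break
--             else:
--                 continue
--             break
--
--         balanced = -1 if balanced == len(S) + 1 else balanced
--
--     return balanced
-- ===== SOURCE B (Python) =====
-- def solution(S):
--     n = len(S)
--     if n <= 1:
--         return -1
--     best = n + 1
--     for start in range(n - 1):
--         lower = set()
--         upper = set()
--         length = 0
--         found = None
--         for c in S[start:]:
--             if 'a' <= c <= 'z':
--                 lower.add(c)
--             elif 'A' <= c <= 'Z':
--                 upper.add(chr(ord(c) + 32))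
--             length += 1
--             if lower == upper:
--                 found = length
--                 break
--         if found is not None:
--             best = min(best, found)
--             if best == 2:
--                 break
--     return -1 if best == n + 1 else best
-- ===== Notes on version B (the rewrite author's own statement) =====
-- stated objective: faster
-- what changed: A re-extracts the substring and rebuilds its letter-sets from scratch for every (start,end) pair; B keeps two incremental presence sets (lowercase seen, uppercase seen lowered) while extending the window from each start, stops at the first balanced end per start, and breaks early once the best is 2.
import Mathlib
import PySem

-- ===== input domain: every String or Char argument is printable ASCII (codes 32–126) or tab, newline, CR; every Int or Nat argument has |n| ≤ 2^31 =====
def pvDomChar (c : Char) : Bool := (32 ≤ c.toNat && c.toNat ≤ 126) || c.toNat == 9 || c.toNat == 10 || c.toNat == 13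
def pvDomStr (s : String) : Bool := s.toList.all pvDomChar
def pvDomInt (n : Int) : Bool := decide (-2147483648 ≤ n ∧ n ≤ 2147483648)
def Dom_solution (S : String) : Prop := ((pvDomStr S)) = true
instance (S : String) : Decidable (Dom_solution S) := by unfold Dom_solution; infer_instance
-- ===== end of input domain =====

-- B replaces A's recompute-sets-per-substring triple scan by per-start incremental
-- lower/upper presence sets with a first-hit inner scan (objective: faster, asymptotic).


-- ===== PORT A =====
-- is_balanced(S): set of ords, split into upper/lower code lists, compare lengths and
-- check every upper code + 32 occurs among the lower codes.  (The Python iterates the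
-- set in hash order only to build lists consumed by len/membership, so the result is
-- iteration-order independent and PySem.Set insertion order is exact.)
def isBalancedA (t : List Char) : Bool :=
  let sset : PySem.Set Char := PySem.Set.ofList t
  let dset : PySem.Set Int := PySem.Set.ofList (sset.map (fun c => (c.toNat : Int)))
  let upper : List Int := dset.filter (fun d => decide (65 ≤ d ∧ d < 91))
  let lower : List Int := dset.filter (fun d => decide (97 ≤ d ∧ d < 123))
  if upper.length ≠ lower.length then false
  else upper.all (fun d => lower.contains (d + 32))

-- inner 'for end in range(start+1, len(S)+1)' loop; returns (balanced, broke-out-of-inner)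
def innerA (s : List Char) (start : Int) (ends : List Int) (bal : Int) : Int × Bool :=
  match ends with
  | [] => (bal, false)
  | e :: rest =>
    let sub := PySem.List.slice s (some start) (some e)
    if isBalancedA sub then
      let bal' := min bal (sub.length : Int)
      if bal' == 2 then (bal', true) else innerA s start rest bal'
    else innerA s start rest bal

-- outer 'for start in range(len(S)-1)' loop with the for-else break propagation
def outerA (s : List Char) (n : Int) (starts : List Int) (bal : Int) : Int :=
  match starts with
  | [] => bal
  | st :: rest =>
    let r := innerA s st (PySem.List.pyRange (st + 1) (n + 1) 1) bal
    if r.2 then r.1 else outerA s n rest r.1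

def solution (S : String) : Int :=
  let s := S.toList
  if (s.length : Int) == 1 then -1
  else
    let n : Int := s.length
    let res := outerA s n (PySem.List.pyRange 0 (n - 1) 1) (n + 1)
    if res == n + 1 then -1 else res

-- ===== PORT B =====
-- inner loop of Source B: extend the window one char at a time, maintaining the set of
-- lowercase letters seen and the set of (lowered) uppercase letters seen; return the
-- window length at the first balanced point ('a' <= c <= 'z' is 97 <= ord c <= 122).
def innerB (lower upper : PySem.Set Char) (length : Int) (cs : List Char) : Option Int :=
  match cs with
  | [] => none
  | c :: rest =>
    let lo := if 97 ≤ c.toNat ∧ c.toNat ≤ 122 then PySem.Set.add lower c else lower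
    let up := if 97 ≤ c.toNat ∧ c.toNat ≤ 122 then upper
              else if 65 ≤ c.toNat ∧ c.toNat ≤ 90 then
                PySem.Set.add upper (Char.ofNat (c.toNat + 32))
              else upper
    if PySem.Set.equal lo up then some (length + 1) else innerB lo up (length + 1) rest

-- outer loop of Source B: best over the first balanced window at each start, break at 2
def outerB (s : List Char) (n : Int) (starts : List Int) (best : Int) : Int :=
  match starts with
  | [] => best
  | st :: rest =>
    match innerB PySem.Set.empty PySem.Set.empty 0 (PySem.List.slice s (some st) none) with
    | some len =>
      let best' := min best len
      if best' == 2 then best' else outerB s n rest best'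
    | none => outerB s n rest best

def solution_alt (S : String) : Int :=
  let s := S.toList
  let n : Int := s.length
  if n ≤ 1 then -1
  else
    let best := outerB s n (PySem.List.pyRange 0 (n - 1) 1) (n + 1)
    if best == n + 1 then -1 else best

-- ===== PRECONDITION & SPEC =====
def Spec_solution (S : String) (out : Int) : Prop := out = solution_alt S
instance (S : String) (out : Int) : Decidable (Spec_solution S out) := by unfold Spec_solution; infer_instance

-- ===== CLAIM (what is proved, stated in full; the proofs are below) =====
def Claim_equal_solution : Prop := ∀ (S : String), Dom_solution S → Spec_solution S (solution S)

-- ===== LEMMAS AND PROOFS =====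

-- Char code facts
theorem charToNat_inj {a b : Char} (h : a.toNat = b.toNat) : a = b := by
  apply Char.ext; exact UInt32.toNat.inj h

theorem toNat_ofNat_small {n : Nat} (h : n ≤ 200) : (Char.ofNat n).toNat = n := by
  have hv : n.isValidChar := Or.inl (by omega)
  simp [Char.ofNat, hv]

-- the lowercase/uppercase presence sets of a window, as Source B's inner loop builds them
def loSet (w : List Char) : PySem.Set Char :=
  PySem.Set.ofList (w.filter (fun c => decide (97 ≤ c.toNat ∧ c.toNat ≤ 122)))
def upSet (w : List Char) : PySem.Set Char :=
  PySem.Set.ofList ((w.filter (fun c => decide (65 ≤ c.toNat ∧ c.toNat ≤ 90))).map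
    (fun c => Char.ofNat (c.toNat + 32)))

-- the balance property both programs decide on a window
def QBal (w : List Char) : Prop :=
  ∀ x : Char, (x ∈ w ∧ 97 ≤ x.toNat ∧ x.toNat ≤ 122) ↔
    (∃ c, c ∈ w ∧ (65 ≤ c.toNat ∧ c.toNat ≤ 90) ∧ x = Char.ofNat (c.toNat + 32))

-- two nodup Int lists, equal length + shifted inclusion  ↔  shifted set equality
theorem nodup_shift_iff (U L : List Int) (hU : U.Nodup) (hL : L.Nodup) :
    (U.length = L.length ∧ ∀ d ∈ U, d + 32 ∈ L) ↔
      (∀ x : Int, x ∈ L ↔ ∃ d ∈ U, x = d + 32) := by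
  have hM : (U.map (· + 32)).Nodup := hU.map (fun a b h => by omega)
  constructor
  · rintro ⟨hlen, hsub⟩ x
    have hsub' : (U.map (· + 32)).toFinset ⊆ L.toFinset := by
      intro y hy
      simp only [List.mem_toFinset, List.mem_map] at hy ⊢
      obtain ⟨d, hd, rfl⟩ := hy
      exact hsub d hd
    have hcard : L.toFinset.card ≤ (U.map (· + 32)).toFinset.card := by
      rw [List.toFinset_card_of_nodup hM, List.toFinset_card_of_nodup hL,
        List.length_map]
      omega
    have heq := Finset.eq_of_subset_of_card_le hsub' hcard
    constructor
    · intro hx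
      have : x ∈ (U.map (· + 32)).toFinset := by
        rw [heq]; exact List.mem_toFinset.mpr hx
      simp only [List.mem_toFinset, List.mem_map] at this
      obtain ⟨d, hd, rfl⟩ := this
      exact ⟨d, hd, rfl⟩
    · rintro ⟨d, hd, rfl⟩
      exact hsub d hd
  · intro h
    have hperm : L.Perm (U.map (· + 32)) := by
      rw [List.perm_ext_iff_of_nodup hL hM]
      intro x
      rw [h x]
      simp only [List.mem_map]
      constructor
      · rintro ⟨d, hd, rfl⟩; exact ⟨d, hd, rfl⟩
      · rintro ⟨d, hd, rfl⟩; exact ⟨d, hd, rfl⟩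
    refine ⟨?_, ?_⟩
    · have := hperm.length_eq
      simp only [List.length_map] at this
      omega
    · intro d hd
      exact (h (d + 32)).mpr ⟨d, hd, rfl⟩

theorem balA_iff (w : List Char) : isBalancedA w = true ↔ QBal w := by
  set D : List Int :=
    PySem.Set.ofList ((PySem.Set.ofList w).map (fun c => (c.toNat : Int))) with hD
  set U := D.filter (fun d => decide (65 ≤ d ∧ d < 91)) with hUdef
  set L := D.filter (fun d => decide (97 ≤ d ∧ d < 123)) with hLdef
  have hA : isBalancedA w =
      (if U.length ≠ L.length then false else U.all (fun d => L.contains (d + 32))) := rfl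
  have hDnd : D.Nodup := PySem.Set.nodup_ofList _
  have hDmem : ∀ d, d ∈ D ↔ ∃ c ∈ w, d = (c.toNat : Int) := by
    intro d
    rw [hD]
    simp only [PySem.Set.mem_ofList, List.mem_map]
    constructor
    · rintro ⟨c, hc, rfl⟩
      exact ⟨c, hc, rfl⟩
    · rintro ⟨c, hc, rfl⟩
      exact ⟨c, hc, rfl⟩
  have hUmem : ∀ d, d ∈ U ↔ (∃ c ∈ w, d = (c.toNat : Int)) ∧ (65 ≤ d ∧ d < 91) := by
    intro d; rw [hUdef, List.mem_filter, hDmem]; simp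
  have hLmem : ∀ d, d ∈ L ↔ (∃ c ∈ w, d = (c.toNat : Int)) ∧ (97 ≤ d ∧ d < 123) := by
    intro d; rw [hLdef, List.mem_filter, hDmem]; simp
  have hUnd : U.Nodup := hDnd.filter _
  have hLnd : L.Nodup := hDnd.filter _
  have hbridge : (∀ x : Int, x ∈ L ↔ ∃ d ∈ U, x = d + 32) ↔ QBal w := by
    constructor
    · intro h x
      constructor
      · rintro ⟨hxw, h97, h122⟩
        have hxL : (x.toNat : Int) ∈ L := (hLmem _).mpr ⟨⟨x, hxw, rfl⟩, by omega⟩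
        obtain ⟨d, hdU, hx⟩ := (h _).mp hxL
        obtain ⟨⟨c, hcw, rfl⟩, h65, h91⟩ := (hUmem _).mp hdU
        refine ⟨c, hcw, ⟨by omega, by omega⟩, ?_⟩
        apply charToNat_inj
        rw [toNat_ofNat_small (by omega)]
        omega
      · rintro ⟨c, hcw, ⟨h65, h90⟩, rfl⟩
        have ht : (Char.ofNat (c.toNat + 32)).toNat = c.toNat + 32 :=
          toNat_ofNat_small (by omega)
        have hxL : ((Char.ofNat (c.toNat + 32)).toNat : Int) ∈ L :=
          (h _).mpr ⟨(c.toNat : Int), (hUmem _).mpr ⟨⟨c, hcw, rfl⟩, by omega⟩, by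
            rw [ht]; push_cast; ring⟩
        obtain ⟨⟨y, hyw, hxy⟩, hr⟩ := (hLmem _).mp hxL
        have : (Char.ofNat (c.toNat + 32)) = y := charToNat_inj (by exact_mod_cast hxy)
        exact ⟨this ▸ hyw, by omega, by omega⟩
    · intro hQ x
      constructor
      · intro hxL
        obtain ⟨⟨c, hcw, rfl⟩, h97, h123⟩ := (hLmem _).mp hxL
        obtain ⟨c', hc'w, hc'r, hceq⟩ := (hQ c).mp ⟨hcw, by omega, by omega⟩
        refine ⟨(c'.toNat : Int), (hUmem _).mpr ⟨⟨c', hc'w, rfl⟩, by omega⟩, ?_⟩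
        have : c.toNat = c'.toNat + 32 := by
          rw [hceq, toNat_ofNat_small (by omega)]
        omega
      · rintro ⟨d, hdU, rfl⟩
        obtain ⟨⟨c, hcw, rfl⟩, h65, h91⟩ := (hUmem _).mp hdU
        have ht : (Char.ofNat (c.toNat + 32)).toNat = c.toNat + 32 :=
          toNat_ofNat_small (by omega)
        have hx := (hQ (Char.ofNat (c.toNat + 32))).mpr ⟨c, hcw, ⟨by omega, by omega⟩, rfl⟩
        refine (hLmem _).mpr ⟨⟨_, hx.1, ?_⟩, by rw [← ht] at *; omega⟩
        rw [ht]; push_cast; ring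
  rw [hA, ← hbridge, ← nodup_shift_iff U L hUnd hLnd]
  by_cases hlen : U.length = L.length
  · simp [hlen, List.all_eq_true]
  · simp [hlen]

theorem balB_iff (w : List Char) :
    PySem.Set.equal (loSet w) (upSet w) = true ↔ QBal w := by
  rw [PySem.Set.equal_iff]
  unfold QBal loSet upSet
  constructor
  · intro h x
    have := h x
    simp only [PySem.Set.mem_ofList, List.mem_filter, List.mem_map,
      decide_eq_true_eq] at this
    constructor
    · intro hx
      obtain ⟨c, ⟨hc, hcr⟩, rfl⟩ := this.mp ⟨hx.1, hx.2.1, hx.2.2⟩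
      exact ⟨c, hc, hcr, rfl⟩
    · rintro ⟨c, hc, hcr, rfl⟩
      have := this.mpr ⟨c, ⟨hc, hcr⟩, rfl⟩
      exact ⟨this.1, this.2⟩
  · intro h x
    have := h x
    simp only [PySem.Set.mem_ofList, List.mem_filter, List.mem_map,
      decide_eq_true_eq]
    constructor
    · intro hx
      obtain ⟨c, hc, hcr, rfl⟩ := this.mp ⟨hx.1, hx.2⟩
      exact ⟨c, ⟨hc, hcr⟩, rfl⟩
    · rintro ⟨c, ⟨hc, hcr⟩, rfl⟩
      have := this.mpr ⟨c, hc, hcr, rfl⟩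
      exact ⟨this.1, this.2.1, this.2.2⟩

theorem balA_eq_balB (w : List Char) :
    isBalancedA w = PySem.Set.equal (loSet w) (upSet w) :=
  Bool.coe_iff_coe.mp ((balA_iff w).trans (balB_iff w).symm)

theorem loSet_append (p : List Char) (c : Char) :
    loSet (p ++ [c]) =
      if 97 ≤ c.toNat ∧ c.toNat ≤ 122 then PySem.Set.add (loSet p) c else loSet p := by
  unfold loSet
  rw [List.filter_append]
  by_cases h : 97 ≤ c.toNat ∧ c.toNat ≤ 122
  · simp [h, List.filter, PySem.Set.ofList_append_singleton]
  · simp [h, List.filter]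

theorem upSet_append (p : List Char) (c : Char) :
    upSet (p ++ [c]) =
      if 97 ≤ c.toNat ∧ c.toNat ≤ 122 then upSet p
      else if 65 ≤ c.toNat ∧ c.toNat ≤ 90 then
        PySem.Set.add (upSet p) (Char.ofNat (c.toNat + 32))
      else upSet p := by
  unfold upSet
  rw [List.filter_append]
  by_cases h1 : 97 ≤ c.toNat ∧ c.toNat ≤ 122
  · have h2 : ¬ (65 ≤ c.toNat ∧ c.toNat ≤ 90) := by omega
    simp [h1, h2, List.filter]
  · by_cases h2 : 65 ≤ c.toNat ∧ c.toNat ≤ 90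
    · simp [h1, h2, List.filter, PySem.Set.ofList_append_singleton]
    · simp [h1, h2, List.filter]

-- once balanced is strictly below every remaining window length, A's inner loop stalls
theorem innerA_stall (ends : List Int) (s : List Char) (st bal : Int)
    (h2 : (bal == 2) = false)
    (hle : ∀ e ∈ ends, bal ≤ ((PySem.List.slice s (some st) (some e)).length : Int)) :
    innerA s st ends bal = (bal, false) := by
  induction ends with
  | nil => rfl
  | cons e rest ih =>
    simp only [innerA]
    have hmin : min bal ((PySem.List.slice s (some st) (some e)).length : Int) = bal := by
      have := hle e (by simp)
      omega
    by_cases hb : isBalancedA (PySem.List.slice s (some st) (some e))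
    · simp only [hb, if_true, hmin, h2, if_false, Bool.false_eq_true]
      exact ih (fun e' he' => hle e' (by simp [he']))
    · simp only [hb, if_false, Bool.false_eq_true]
      exact ih (fun e' he' => hle e' (by simp [he']))

theorem inner_eq (r : List Char) (p s : List Char) (st bal : Int) (hst : 0 ≤ st)
    (hd : s.drop st.toNat = p ++ r) :
    innerA s st (PySem.List.pyRange (st + 1 + p.length) ((s.length : Int) + 1) 1) bal =
      (match innerB (loSet p) (upSet p) (p.length : Int) r with
       | some m => (min bal m, min bal m == 2)
       | none => (bal, false)) := by
  induction r generalizing p bal with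
  | nil =>
    have hlen : s.length - st.toNat = p.length := by
      have := congrArg List.length hd
      simpa using this
    have hstc : (st.toNat : Int) = st := Int.toNat_of_nonneg hst
    have hnil : PySem.List.pyRange (st + 1 + p.length) ((s.length : Int) + 1) 1 = [] := by
      apply PySem.List.pyRange_one_eq_nil
      omega
    rw [hnil]
    rfl
  | cons c rest ih =>
    have hlen : s.length - st.toNat = p.length + (rest.length + 1) := by
      have := congrArg List.length hd
      simpa using this
    have hstlt : st.toNat < s.length := by
      by_contra hcon
      omega
    have hstc : (st.toNat : Int) = st := Int.toNat_of_nonneg hst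
    have hlt : st + 1 + (p.length : Int) < (s.length : Int) + 1 := by omega
    rw [PySem.List.pyRange_one_cons hlt]
    simp only [innerA]
    have he0 : (0:Int) ≤ st + 1 + (p.length : Int) := by omega
    have hsub : PySem.List.slice s (some st) (some (st + 1 + (p.length : Int))) = p ++ [c] := by
      rw [PySem.List.slice_toNat s hst he0]
      have h1 : (st + 1 + (p.length : Int)).toNat - st.toNat = p.length + 1 := by omega
      rw [h1, hd]
      simp [List.take_append]
    rw [hsub, balA_eq_balB]
    simp only [innerB]
    rw [← loSet_append, ← upSet_append]
    rcases Bool.eq_false_or_eq_true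
        (PySem.Set.equal (loSet (p ++ [c])) (upSet (p ++ [c]))) with hbal | hbal
    · -- balanced: B stops here; A takes the min and, if not 2, stalls on longer windows
      simp only [hbal, if_true]
      have hslen : (((p ++ [c]).length : Nat) : Int) = (p.length : Int) + 1 := by
        simp
      rw [hslen]
      by_cases h2 : (min bal ((p.length : Int) + 1) == 2) = true
      · simp [h2]
      · have h2' : (min bal ((p.length : Int) + 1) == 2) = false := by
          simpa using h2
        have hstall : innerA s st
            (PySem.List.pyRange (st + 1 + (p.length : Int) + 1) ((s.length : Int) + 1) 1)
            (min bal ((p.length : Int) + 1)) = (min bal ((p.length : Int) + 1), false) := by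
          apply innerA_stall _ s st _ h2'
          intro e he
          rw [PySem.List.mem_pyRange_one] at he
          rw [PySem.List.slice_toNat s hst (by omega)]
          have htk : ((s.drop st.toNat).take (e.toNat - st.toNat)).length
              = e.toNat - st.toNat := by
            simp only [List.length_take, List.length_drop]
            omega
          rw [htk]
          have hmr : bal ⊓ ((p.length : Int) + 1) ≤ (p.length : Int) + 1 := min_le_right _ _
          omega
        simp only [h2', if_false, Bool.false_eq_true]
        rw [hstall]
    · -- not balanced yet: both loops step to the extended window
      simp only [hbal, if_false, Bool.false_eq_true]
      have harr : st + 1 + (p.length : Int) + 1 = st + 1 + ((p ++ [c]).length : Int) := by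
        simp
        omega
      rw [harr]
      have hplen : ((p.length : Int) + 1) = (((p ++ [c]).length : Nat) : Int) := by
        simp
      rw [hplen]
      exact ih (p ++ [c]) bal (by rw [hd]; simp)
theorem outer_eq (starts : List Int) (s : List Char) (bal : Int)
    (hpos : ∀ st ∈ starts, 0 ≤ st) :
    outerA s (s.length : Int) starts bal = outerB s (s.length : Int) starts bal := by
  induction starts generalizing bal with
  | nil => rfl
  | cons st rest ih =>
    have hst : 0 ≤ st := hpos st (by simp)
    have hinner := inner_eq (s.drop st.toNat) [] s st bal hst (by simp)
    simp only [List.length_nil, Nat.cast_zero, add_zero] at hinner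
    simp only [outerA, outerB]
    rw [PySem.List.slice_from _ hst]
    have hempty : loSet [] = PySem.Set.empty ∧ upSet [] = PySem.Set.empty := ⟨rfl, rfl⟩
    rw [hempty.1, hempty.2] at hinner
    rw [hinner]
    cases hres : innerB PySem.Set.empty PySem.Set.empty 0 (s.drop st.toNat) with
    | none =>
      simp only
      exact ih bal (fun x hx => hpos x (by simp [hx]))
    | some m =>
      simp only
      by_cases h2 : (min bal m == 2) = true
      · simp [h2]
      · have h2' : (min bal m == 2) = false := by simpa using h2
        simp only [h2', if_false, Bool.false_eq_true]
        exact ih (min bal m) (fun x hx => hpos x (by simp [hx]))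

-- ===== VERDICT (by name: the statement is the Claim_ definition above) =====
theorem solution_spec : Claim_equal_solution := by
  intro S _
  unfold Spec_solution solution solution_alt
  set s := S.toList with hs
  by_cases h1 : ((s.length : Int) == 1) = true
  · have h1' : (s.length : Int) = 1 := by simpa using h1
    simp [h1']
  · have hne : (s.length : Int) ≠ 1 := by simpa using h1
    by_cases h0 : s.length = 0
    · have hnil : s = [] := List.eq_nil_of_length_eq_zero h0
      rw [hnil]
      rfl
    · have hgt : ¬ ((s.length : Int) ≤ 1) := by omega
      simp only [h1, if_false, hgt, Bool.false_eq_true]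
      rw [outer_eq _ s _ (fun st hst => by
        rw [PySem.List.mem_pyRange_one] at hst
        omega)]
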